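-- pv_equiv track=rewrite | github.com/LinuxCNC/linuxcnc | src/emc/usr_intf/qtplasmac/qtplasmac_gcode.py | set_to_upper_case
-- ===== SOURCE A (Python) =====
-- def set_to_upper_case(data):
--     tmp = ''
--     keep = False
--     for d in data:
--         if d in '#':
--             keep = True
--             tmp += d
--         elif d in '>':
--             keep = False
--             tmp += d
--         else:
--             if keep:
--                 tmp += d
--             else:
--                 tmp += d.upper()
--     return tmp
-- ===== SOURCE B (Python) =====
-- def set_to_upper_case(data):
--     out = []
--     rest = data
--     while True:
--         pre, hash_, rest = rest.partition('#')
--         out.append(pre.upper())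
--         if not hash_:
--             break
--         seg, gt, rest = rest.partition('>')
--         out.append('#' + seg + gt)
--         if not gt:
--             break
--     return ''.join(out)
-- ===== Notes on version B (the rewrite author's own statement) =====
-- stated objective: faster
-- what changed: Replaces the per-character state-flag loop with segment splitting: repeatedly partition the remaining string at the hash marker (uppercasing the gap with one bulk upper() call) and at the closing bracket (segment kept verbatim), joining the pieces.
import Mathlib
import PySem

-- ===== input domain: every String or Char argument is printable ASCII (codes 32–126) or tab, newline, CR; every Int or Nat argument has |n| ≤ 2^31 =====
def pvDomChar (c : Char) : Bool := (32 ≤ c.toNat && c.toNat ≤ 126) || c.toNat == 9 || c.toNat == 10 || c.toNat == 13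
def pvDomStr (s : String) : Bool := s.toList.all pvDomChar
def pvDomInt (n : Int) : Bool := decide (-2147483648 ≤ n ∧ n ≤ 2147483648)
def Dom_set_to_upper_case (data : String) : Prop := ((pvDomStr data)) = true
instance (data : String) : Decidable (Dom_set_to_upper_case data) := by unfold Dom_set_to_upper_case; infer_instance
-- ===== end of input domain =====

-- B replaces A's per-character keep-flag loop by partition-based segment splitting with bulk uppercasing (objective: faster, constant-factor; measured).

-- ===== PORT A =====
-- A's loop body: state (tmp, keep), branches in A's order
def pvStep (st : List Char × Bool) (d : Char) : List Char × Bool :=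
  if d == '#' then (st.1 ++ [d], true)
  else if d == '>' then (st.1 ++ [d], false)
  else if st.2 then (st.1 ++ [d], st.2)
  else (st.1 ++ [PySem.Chars.upperChar d], st.2)

def set_to_upper_case (data : String) : String :=
  String.ofList (data.toList.foldl pvStep ([], false)).1

-- ===== PORT B =====
-- Source B's loop: partition at the hash marker (uppercase the gap), then at the closing bracket (segment kept verbatim), repeat on the rest
def pvAltGo : List Char → List Char
  | cs =>
    let pre := cs.takeWhile (· ≠ '#')
    match h : cs.dropWhile (· ≠ '#') with
    | [] => PySem.Chars.upper pre
    | _ :: tail =>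
      let seg := tail.takeWhile (· ≠ '>')
      match h2 : tail.dropWhile (· ≠ '>') with
      | [] => PySem.Chars.upper pre ++ '#' :: seg
      | _ :: tail2 => PySem.Chars.upper pre ++ '#' :: (seg ++ '>' :: pvAltGo tail2)
  termination_by cs => cs.length
  decreasing_by
    show tail2.length < cs.length
    have h1 : (cs.dropWhile (· ≠ '#')).length ≤ cs.length := List.length_dropWhile_le _ _
    have h3 : (tail.dropWhile (· ≠ '>')).length ≤ tail.length := List.length_dropWhile_le _ _
    rw [h] at h1; rw [h2] at h3
    simp at h1 h3; omega

def set_to_upper_case_alt (data : String) : String :=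
  String.ofList (pvAltGo data.toList)

-- ===== PRECONDITION & SPEC =====
def Spec_set_to_upper_case (data : String) (out : String) : Prop := out = set_to_upper_case_alt data
instance (data : String) (out : String) : Decidable (Spec_set_to_upper_case data out) := by unfold Spec_set_to_upper_case; infer_instance

-- ===== CLAIM (what is proved, stated in full; the proofs are below) =====
def Claim_equal_set_to_upper_case : Prop := ∀ (data : String), Dom_set_to_upper_case data → Spec_set_to_upper_case data (set_to_upper_case data)

-- ===== LEMMAS AND PROOFS =====

-- A's loop as a pure recursion on the remaining characters and the keep flag
def pvAGo : List Char → Bool → List Char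
  | [], _ => []
  | d :: t, keep =>
    if d = '#' then d :: pvAGo t true
    else if d = '>' then d :: pvAGo t false
    else (if keep then d else PySem.Chars.upperChar d) :: pvAGo t keep

-- value produced by B while inside a '#'-segment
def pvInSeg (cs : List Char) : List Char :=
  cs.takeWhile (· ≠ '>') ++
    match cs.dropWhile (· ≠ '>') with
    | [] => []
    | _ :: t => '>' :: pvAltGo t

theorem pvFold_eq (cs : List Char) (acc : List Char) (keep : Bool) :
    (cs.foldl pvStep (acc, keep)).1 = acc ++ pvAGo cs keep := by
  induction cs generalizing acc keep with
  | nil => simp [pvAGo]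
  | cons d t ih =>
    simp only [List.foldl_cons]
    by_cases h1 : d = '#'
    · simp [pvStep, h1, pvAGo, ih]
    · by_cases h2 : d = '>'
      · simp [pvStep, h1, h2, pvAGo, ih]
      · cases keep <;> simp [pvStep, h1, h2, pvAGo, ih]

theorem pvAltGo_nil : pvAltGo [] = [] := by
  rw [pvAltGo]; simp [PySem.Chars.upper]

theorem pvAltGo_cons_ne (d : Char) (t : List Char) (h : d ≠ '#') :
    pvAltGo (d :: t) = PySem.Chars.upperChar d :: pvAltGo t := by
  rw [pvAltGo, pvAltGo]
  rw [List.takeWhile_cons, List.dropWhile_cons]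
  rw [if_pos (show (decide (d ≠ '#')) = true by simp [h])]
  split <;> split <;> simp_all [PySem.Chars.upper]

theorem pvDropAux (l : List Char) (c : Char) (h : ∀ x ∈ l, ¬ x = c) :
    l.dropWhile (fun x => !decide (x = c)) = [] := by
  simp [List.dropWhile_eq_nil_iff]; exact h

theorem pvAltGo_hash (t : List Char) : pvAltGo ('#' :: t) = '#' :: pvInSeg t := by
  rw [pvAltGo]
  rw [List.takeWhile_cons, List.dropWhile_cons]
  rw [if_neg (show ¬ (decide (('#':Char) ≠ '#')) = true by simp)]
  unfold pvInSeg
  repeat' split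
  all_goals simp_all [PySem.Chars.upper, pvDropAux]

theorem pvMain (cs : List Char) :
    pvAGo cs false = pvAltGo cs ∧ pvAGo cs true = pvInSeg cs := by
  induction cs with
  | nil =>
    refine ⟨by simp [pvAGo, pvAltGo_nil], ?_⟩
    simp [pvAGo, pvInSeg]
  | cons d t ih =>
    refine ⟨?_, ?_⟩
    · by_cases h1 : d = '#'
      · subst h1
        rw [pvAltGo_hash]
        simp [pvAGo, ih.2]
      · by_cases h2 : d = '>'
        · subst h2
          rw [pvAltGo_cons_ne _ _ (by decide)]
          have hup : PySem.Chars.upperChar '>' = '>' := by decide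
          simp [pvAGo, hup, ih.1]
        · rw [pvAltGo_cons_ne _ _ h1]
          simp [pvAGo, h1, h2, ih.1]
    · by_cases h2 : d = '>'
      · subst h2
        have hne : ('>' : Char) ≠ '#' := by decide
        simp [pvAGo, hne, pvInSeg, ih.1]
      · by_cases h1 : d = '#'
        · subst h1
          simp [pvAGo, pvInSeg, h2, ih.2]
        · simp [pvAGo, pvInSeg, h1, h2, ih.2]

-- ===== VERDICT (by name: the statement is the Claim_ definition above) =====
theorem set_to_upper_case_spec : Claim_equal_set_to_upper_case := by
  intro data _
  unfold Spec_set_to_upper_case set_to_upper_case set_to_upper_case_alt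
  rw [pvFold_eq, (pvMain data.toList).1]
  simp
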